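-- pv_equiv track=rewrite | github.com/marathan24/stackbench-v3-demo-testing | stackbench/evaluation/prompt_robustness.py | rephrase_prompt
-- ===== SOURCE A (Python) =====
-- def rephrase_prompt(prompt: str) -> str:
--     """
--     Create a rephrased version of the prompt.
--
--     Changes wording while preserving meaning.
--
--     Args:
--         prompt: Original prompt text
--
--     Returns:
--         Rephrased prompt
--
--     Example:
--         Original: "Evaluate the documentation for clarity."
--         Rephrased: "Assess the docs for how clear they are."
--     """
--     # Simple rephrasing examples (in production, use LLM for better rephrasing)
--     replacements = {
--         "evaluate": "assess",
--         "documentation": "docs",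
--         "clarity": "how clear it is",
--         "identify": "find",
--         "analyze": "examine",
--         "complete": "thorough",
--     }
--
--     rephrased = prompt
--     for original, replacement in replacements.items():
--         if original in rephrased.lower():
--             # Simple case-insensitive replacement
--             rephrased = rephrased.replace(original, replacement)
--
--     return rephrased
-- ===== SOURCE B (Python) =====
-- def rephrase_prompt(prompt: str) -> str:
--     """Rephrase the prompt by applying the fixed word substitutions in table order."""
--     pairs = [
--         ("evaluate", "assess"),
--         ("documentation", "docs"),
--         ("clarity", "how clear it is"),
--         ("identify", "find"),
--         ("analyze", "examine"),
--         ("complete", "thorough"),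
--     ]
--
--     def go(text, remaining):
--         # Each substitution is one split on the key joined with the replacement;
--         # the redundant case-folded membership test of the original is provably a no-op.
--         if not remaining:
--             return text
--         old, new = remaining[0]
--         return go(new.join(text.split(old)), remaining[1:])
--
--     return go(prompt, pairs)
-- ===== Notes on version B (the rewrite author's own statement) =====
-- stated objective: alternative
-- what changed: B replaces A's guarded chain of str.replace calls (each preceded by a redundant case-folded substring scan) by a recursion over the substitution table that performs each substitution as a split-on-key/join-with-replacement, dropping the lower() membership test after proving it a no-op.
import Mathlib
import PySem

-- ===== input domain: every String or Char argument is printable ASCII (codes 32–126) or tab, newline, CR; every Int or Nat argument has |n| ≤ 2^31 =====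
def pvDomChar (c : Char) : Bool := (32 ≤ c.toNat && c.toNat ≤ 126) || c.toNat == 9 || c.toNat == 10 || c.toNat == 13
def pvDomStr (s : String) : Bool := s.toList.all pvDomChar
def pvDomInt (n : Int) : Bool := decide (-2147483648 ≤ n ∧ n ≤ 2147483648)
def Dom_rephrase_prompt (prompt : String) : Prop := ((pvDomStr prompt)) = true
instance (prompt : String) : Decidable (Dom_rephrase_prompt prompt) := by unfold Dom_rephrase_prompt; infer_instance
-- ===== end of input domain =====

-- B applies each of the six fixed substitutions as one split-on-key/join-with-replacement in a
-- recursion over the table, dropping A's case-folded membership guard (proved a no-op);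
-- same cost, alternative decomposition.

-- ===== PORT A =====
-- A's `replacements` dict, as its insertion-ordered items() list
def rpReplacementsA : List (String × String) :=
  [("evaluate", "assess"), ("documentation", "docs"), ("clarity", "how clear it is"),
   ("identify", "find"), ("analyze", "examine"), ("complete", "thorough")]

def rephrase_prompt (prompt : String) : String :=
  rpReplacementsA.foldl
    (fun rephrased kv =>
      if PySem.Str.isIn kv.1 (PySem.Str.lower rephrased) then
        PySem.Str.replace rephrased kv.1 kv.2
      else rephrased)
    prompt

-- ===== PORT B =====
def rpPairsB : List (String × String) :=
  [("evaluate", "assess"), ("documentation", "docs"), ("clarity", "how clear it is"),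
   ("identify", "find"), ("analyze", "examine"), ("complete", "thorough")]

-- Source B's inner recursion `go`; `text.split(old)` is `Str.split?` (some, since every key in the
-- table is a nonempty literal; `.getD []` is unreachable)
def rpGoB : String → List (String × String) → String
  | text, [] => text
  | text, (old, nw) :: rest => rpGoB (PySem.Str.join nw ((PySem.Str.split? text old).getD [])) rest

def rephrase_prompt_alt (prompt : String) : String := rpGoB prompt rpPairsB

-- ===== PRECONDITION & SPEC =====
def Spec_rephrase_prompt (prompt : String) (out : String) : Prop := out = rephrase_prompt_alt prompt
instance (prompt : String) (out : String) : Decidable (Spec_rephrase_prompt prompt out) := by unfold Spec_rephrase_prompt; infer_instance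

-- ===== CLAIM (what is proved, stated in full; the proofs are below) =====
def Claim_equal_rephrase_prompt : Prop := ∀ (prompt : String), Dom_rephrase_prompt prompt → Spec_rephrase_prompt prompt (rephrase_prompt prompt)

-- ===== LEMMAS AND PROOFS =====

-- one-step unfoldings of the two fueled scans inside PySem.Chars.replace / PySem.Chars.splitOn
theorem rgo_nil (old nw : List Char) (fuel : Nat) (acc : List Char) :
    PySem.Chars.replace.go old nw fuel [] acc = acc.reverse := by
  cases fuel <;> simp [PySem.Chars.replace.go]

theorem rgo_cons (old nw : List Char) (fuel : Nat) (c : Char) (t acc : List Char) :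
    PySem.Chars.replace.go old nw (fuel+1) (c::t) acc =
      if old.isPrefixOf (c::t) then PySem.Chars.replace.go old nw fuel ((c::t).drop old.length) (nw.reverse++acc)
      else PySem.Chars.replace.go old nw fuel t (c::acc) := by
  rw [PySem.Chars.replace.go.eq_def]

theorem sgo_nil (sep : List Char) (fuel : Nat) (cur : List Char) (acc : List (List Char)) :
    PySem.Chars.splitOn.go sep (fuel+1) [] cur acc = (cur.reverse :: acc).reverse := by
  rw [PySem.Chars.splitOn.go.eq_def]

theorem sgo_cons (sep : List Char) (fuel : Nat) (c : Char) (rest cur : List Char) (acc : List (List Char)) :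
    PySem.Chars.splitOn.go sep (fuel+1) (c::rest) cur acc =
      if sep.isPrefixOf (c::rest) then PySem.Chars.splitOn.go sep fuel ((c::rest).drop sep.length) [] (cur.reverse :: acc)
      else PySem.Chars.splitOn.go sep fuel rest (c::cur) acc := by
  rw [PySem.Chars.splitOn.go.eq_def]

-- the accumulator of replace.go only ever gets prepended (reversed) to the result
theorem rgo_acc (old nw : List Char) : ∀ (fuel : Nat) (l acc : List Char),
    PySem.Chars.replace.go old nw fuel l acc = acc.reverse ++ PySem.Chars.replace.go old nw fuel l [] := by
  intro fuel
  induction fuel with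
  | zero => intro l acc; simp [PySem.Chars.replace.go]
  | succ f ih =>
    intro l acc
    cases l with
    | nil => rw [rgo_nil, rgo_nil]; simp
    | cons c t =>
      rw [rgo_cons, rgo_cons]
      by_cases h : old.isPrefixOf (c :: t) = true
      · simp only [h, if_pos]
        rw [ih _ (nw.reverse ++ acc), ih _ (nw.reverse ++ [])]
        simp
      · simp only [h, Bool.false_eq_true, reduceIte]
        rw [ih t (c :: acc), ih t [c]]
        simp

-- replace.go ignores its fuel once the fuel covers the string
theorem rgo_fuel (old nw : List Char) (hold : old ≠ []) : ∀ (f1 f2 : Nat) (l acc : List Char),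
    l.length ≤ f1 → l.length ≤ f2 →
    PySem.Chars.replace.go old nw f1 l acc = PySem.Chars.replace.go old nw f2 l acc := by
  intro f1
  induction f1 with
  | zero =>
    intro f2 l acc h1 h2
    have hl : l = [] := by cases l <;> simp_all
    subst hl
    rw [rgo_nil, rgo_nil]
  | succ f ih =>
    intro f2 l acc h1 h2
    cases l with
    | nil => rw [rgo_nil, rgo_nil]
    | cons c t =>
      cases f2 with
      | zero => simp at h2
      | succ f2' =>
        rw [rgo_cons, rgo_cons]
        have hop : 1 ≤ old.length := by cases old <;> simp_all
        by_cases h : old.isPrefixOf (c :: t) = true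
        · simp only [h, if_pos]
          apply ih <;> simp_all <;> omega
        · simp only [h, Bool.false_eq_true, reduceIte]
          apply ih <;> simp_all

-- when the pattern occurs nowhere, replace.go copies the string unchanged
theorem rgo_not_infix (old nw : List Char) : ∀ (fuel : Nat) (l acc : List Char),
    ¬ old <:+: l →
    PySem.Chars.replace.go old nw fuel l acc = acc.reverse ++ l := by
  intro fuel
  induction fuel with
  | zero => intro l acc _; simp [PySem.Chars.replace.go]
  | succ f ih =>
    intro l acc h
    cases l with
    | nil => rw [rgo_nil]; simp
    | cons c t =>
      rw [rgo_cons]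
      have hp : ¬ old.isPrefixOf (c :: t) = true := by
        intro hpre
        exact h (List.IsPrefix.isInfix (List.isPrefixOf_iff_prefix.mp hpre))
      simp only [hp, Bool.false_eq_true, reduceIte]
      rw [ih t (c :: acc) (fun hi => h (hi.trans (List.suffix_cons c t).isInfix))]
      simp

-- the accumulator of splitOn.go only ever gets prepended (reversed) to the piece list
theorem sgo_acc (sep : List Char) : ∀ (fuel : Nat) (l cur : List Char) (acc : List (List Char)),
    PySem.Chars.splitOn.go sep fuel l cur acc = acc.reverse ++ PySem.Chars.splitOn.go sep fuel l cur [] := by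
  intro fuel
  induction fuel with
  | zero => intro l cur acc; simp [PySem.Chars.splitOn.go]
  | succ f ih =>
    intro l cur acc
    cases l with
    | nil => rw [sgo_nil, sgo_nil]; simp
    | cons c rest =>
      rw [sgo_cons, sgo_cons]
      by_cases h : sep.isPrefixOf (c :: rest) = true
      · simp only [h, if_pos]
        rw [ih _ [] (cur.reverse :: acc), ih _ [] (cur.reverse :: [])]
        simp
      · simp only [h, Bool.false_eq_true, reduceIte]
        exact ih rest (c :: cur) acc

theorem sgo_ne_nil (sep : List Char) : ∀ (fuel : Nat) (l cur : List Char) (acc : List (List Char)),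
    PySem.Chars.splitOn.go sep fuel l cur acc ≠ [] := by
  intro fuel
  induction fuel with
  | zero => intro l cur acc; simp [PySem.Chars.splitOn.go]
  | succ f ih =>
    intro l cur acc
    cases l with
    | nil => rw [sgo_nil]; simp
    | cons c rest =>
      rw [sgo_cons]
      by_cases h : sep.isPrefixOf (c :: rest) = true
      · simp only [h, if_pos]; exact ih _ _ _
      · simp only [h, Bool.false_eq_true, reduceIte]; exact ih _ _ _

-- core invariant: joining splitOn.go's pieces with `nw` is exactly replace.go
theorem sgo_join0 (sep nw : List Char) (hsep : sep ≠ []) : ∀ (fuel : Nat) (l cur : List Char), l.length < fuel →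
    PySem.Chars.join nw (PySem.Chars.splitOn.go sep fuel l cur []) =
      cur.reverse ++ PySem.Chars.replace.go sep nw fuel l [] := by
  intro fuel
  induction fuel with
  | zero => intro l cur h; omega
  | succ f ih =>
    intro l cur h
    have hsl : 1 ≤ sep.length := by cases sep <;> simp_all
    cases l with
    | nil => rw [sgo_nil, rgo_nil]; simp [PySem.Chars.join_singleton]
    | cons c rest =>
      rw [sgo_cons, rgo_cons]
      by_cases hp : sep.isPrefixOf (c :: rest) = true
      · simp only [hp, if_pos]
        rw [sgo_acc sep f _ [] [cur.reverse]]
        obtain ⟨q, S', hqs⟩ : ∃ q S', PySem.Chars.splitOn.go sep f ((c::rest).drop sep.length) [] [] = q :: S' := by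
          cases hx : PySem.Chars.splitOn.go sep f ((c::rest).drop sep.length) [] [] with
          | nil => exact absurd hx (sgo_ne_nil sep f _ [] [])
          | cons q S' => exact ⟨q, S', rfl⟩
        have hd : ((c::rest).drop sep.length).length < f := by
          simp only [List.length_drop, List.length_cons]
          simp only [List.length_cons] at h
          omega
        have hih := ih ((c::rest).drop sep.length) [] hd
        rw [hqs] at hih ⊢
        simp only [List.reverse_cons, List.reverse_nil, List.nil_append]
        rw [List.singleton_append, PySem.Chars.join_cons_cons]
        simp only [List.reverse_nil, List.nil_append] at hih
        rw [hih]
        rw [rgo_acc sep nw f _ (nw.reverse ++ [])]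
        simp
      · simp only [hp, Bool.false_eq_true, reduceIte]
        rw [ih rest (c :: cur) (by simp at h; omega)]
        rw [rgo_acc sep nw f rest [c]]
        simp

theorem join_splitOn_eq_replace (s k v : List Char) (hk : k ≠ []) :
    PySem.Chars.join v (PySem.Chars.splitOn s k) = PySem.Chars.replace s k v := by
  unfold PySem.Chars.splitOn PySem.Chars.replace
  have hke : k.isEmpty = false := by cases k <;> simp_all
  rw [hke]
  simp only [Bool.false_eq_true, reduceIte]
  rw [sgo_join0 k v hk (s.length+1) s [] (by omega)]
  simp only [List.reverse_nil, List.nil_append]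
  exact rgo_fuel k v hk (s.length+1) s.length s [] (by omega) (by omega)

theorem replace_of_not_infix (s k v : List Char) (hk : k ≠ []) (h : ¬ k <:+: s) :
    PySem.Chars.replace s k v = s := by
  unfold PySem.Chars.replace
  have hke : k.isEmpty = false := by cases k <;> simp_all
  rw [hke]
  simp only [Bool.false_eq_true, reduceIte]
  rw [rgo_not_infix k v s.length s [] h]
  simp

-- one table entry: A's guarded case-sensitive replace = B's split/join (the guard is a no-op:
-- a lowercase key occurring in s also occurs in s.lower())
theorem chars_step (k v s : List Char) (hk : k ≠ []) (hlow : k.map PySem.Chars.lowerChar = k) :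
    (if PySem.Chars.isIn k (PySem.Chars.lower s) then PySem.Chars.replace s k v else s) =
      PySem.Chars.join v (PySem.Chars.splitOn s k) := by
  rw [join_splitOn_eq_replace s k v hk]
  by_cases hc : PySem.Chars.isIn k (PySem.Chars.lower s) = true
  · rw [if_pos hc]
  · rw [if_neg hc]
    have hni : ¬ k <:+: s := by
      intro hi
      have : k <:+: PySem.Chars.lower s := by
        have := hi.map PySem.Chars.lowerChar
        rwa [hlow] at this
      rw [Bool.not_eq_true, PySem.Chars.isIn_eq_false_iff] at hc
      exact hc this
    rw [replace_of_not_infix s k v hk hni]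

theorem split_getD (s k : String) (hk : k.toList ≠ []) :
    ((PySem.Str.split? s k).getD []).map String.toList = PySem.Chars.splitOn s.toList k.toList := by
  have h := PySem.Str.split?_map s k
  unfold PySem.Chars.split? at h
  have hke : k.toList.isEmpty = false := by cases hx : k.toList <;> simp_all
  rw [hke] at h
  simp only [Bool.false_eq_true, reduceIte] at h
  cases hsp : PySem.Str.split? s k with
  | none => rw [hsp] at h; simp at h
  | some ps => rw [hsp] at h; simpa using h

-- one table entry, lifted to String
theorem str_step (k v s : String) (hk : k.toList ≠ []) (hlow : k.toList.map PySem.Chars.lowerChar = k.toList) :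
    (if PySem.Str.isIn k (PySem.Str.lower s) then PySem.Str.replace s k v else s) =
      PySem.Str.join v ((PySem.Str.split? s k).getD []) := by
  apply String.toList_inj.mp
  rw [apply_ite String.toList]
  rw [PySem.Str.toList_replace, PySem.Str.toList_join, split_getD s k hk]
  rw [PySem.Str.isIn_eq, PySem.Str.toList_lower]
  exact chars_step k.toList v.toList s.toList hk hlow

-- ===== VERDICT (by name: the statement is the Claim_ definition above) =====
theorem rephrase_prompt_spec : Claim_equal_rephrase_prompt := by
  intro prompt _
  unfold Spec_rephrase_prompt rephrase_prompt rephrase_prompt_alt rpReplacementsA rpPairsB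
  simp only [List.foldl_cons, List.foldl_nil, rpGoB]
  rw [str_step "evaluate" "assess" _ (by decide) (by decide),
      str_step "documentation" "docs" _ (by decide) (by decide),
      str_step "clarity" "how clear it is" _ (by decide) (by decide),
      str_step "identify" "find" _ (by decide) (by decide),
      str_step "analyze" "examine" _ (by decide) (by decide),
      str_step "complete" "thorough" _ (by decide) (by decide)]
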